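-- pv_equiv track=rewrite | github.com/PythonIsMagic/eular_python | eular18.py | move_path
-- ===== SOURCE A (Python) =====
-- def move_path(path, row):
--     # Base case: If the row is 0, we can't move that one since its the top.
--     # Should mean iteration is over.
--     if row == 0:
--         return False
--     elif path[row] == path[row - 1]:
--         path[row] += 1
--
--         # Make sure all sub rows match! To avoid skips
--         for x in range(row + 1, len(path)):
--             path[x] = path[row]
--
--         return True
--     else:
--
--         return move_path(path, row - 1)
--     pass
-- ===== SOURCE B (Python) =====
-- def move_path(path, row):
--     while row > 0:
--         if path[row] == path[row - 1]:
--             path[row] += 1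
--             for x in range(row + 1, len(path)):
--                 path[x] = path[row]
--             return True
--         row -= 1
--     return False
-- ===== Notes on version B (the rewrite author's own statement) =====
-- stated objective: idiomatic
-- what changed: The tail-recursive downward scan is rewritten as an iterative while-loop with the same single mutation site and identical return values.
-- outside the precondition, e.g. on move_path([1, 1], -1): A returns True, B returns False
import Mathlib
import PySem

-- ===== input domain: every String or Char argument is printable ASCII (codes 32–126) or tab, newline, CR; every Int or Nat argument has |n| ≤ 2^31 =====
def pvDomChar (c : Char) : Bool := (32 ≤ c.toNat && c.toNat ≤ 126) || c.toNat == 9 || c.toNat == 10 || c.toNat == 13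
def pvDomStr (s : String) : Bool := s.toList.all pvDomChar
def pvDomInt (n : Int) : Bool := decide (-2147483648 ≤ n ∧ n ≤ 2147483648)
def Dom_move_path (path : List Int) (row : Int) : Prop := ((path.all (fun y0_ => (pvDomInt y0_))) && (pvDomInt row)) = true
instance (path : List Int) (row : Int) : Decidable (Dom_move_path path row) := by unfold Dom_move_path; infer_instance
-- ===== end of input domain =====

-- B replaces A's tail recursion by an iterative while-loop (same downward scan, same return values);
-- objective: idiomatic. Both Pythons mutate `path` in place on success; the equivalence proved here is
-- about the RETURN value only (B performs the same mutation).

-- ===== PORT A =====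
-- literal transliteration of A's tail recursion; the in-place mutation does not affect the
-- returned Bool, so only the Bool is computed
def move_path (path : List Int) (row : Int) : Bool :=
  if row = 0 then false
  else
    match h : PySem.List.pyGet? path row, PySem.List.pyGet? path (row - 1) with
    | some a, some b =>
      if a = b then true else move_path path (row - 1)
    | _, _ => false   -- IndexError in Python; unreachable under Pre_
termination_by (row + path.length + 1).toNat
decreasing_by
  have hr : PySem.Raise.InRange path.length row := by
    by_contra hc
    rw [← PySem.List.pyGet?_eq_none_iff (xs := path)] at hc
    simp [hc] at h
  unfold PySem.Raise.InRange at hr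
  omega

-- ===== PORT B =====
-- B's `while row > 0` loop, as recursion on the loop counter
def pvAltLoop (path : List Int) : Nat → Bool
  | 0 => false
  | r + 1 =>
    if PySem.List.pyGet? path ((r : Int) + 1) = PySem.List.pyGet? path (r : Int) then true
    else pvAltLoop path r

def move_path_alt (path : List Int) (row : Int) : Bool :=
  pvAltLoop path row.toNat

-- ===== PRECONDITION & SPEC =====
-- Pre_ excludes rows outside [0, len(path)): for row ≥ len (and row < -len) A raises IndexError,
-- and for negative in-range rows A's value comes from accidental negative-index wraparound, an
-- artefact B's downward loop never reproduces.
def Pre_move_path (path : List Int) (row : Int) : Prop :=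
  row = 0 ∨ (0 < row ∧ row < path.length)
instance (path : List Int) (row : Int) : Decidable (Pre_move_path path row) := by
  unfold Pre_move_path; infer_instance

def pvWitness_move_path : List Int × Int := ([1, 1, 3], 2)

def Spec_move_path (path : List Int) (row : Int) (out : Bool) : Prop := out = move_path_alt path row
instance (path : List Int) (row : Int) (out : Bool) : Decidable (Spec_move_path path row out) := by unfold Spec_move_path; infer_instance

-- ===== CLAIM (what is proved, stated in full; the proofs are below) =====
def Claim_equal_move_path : Prop := ∀ (path : List Int) (row : Int), Dom_move_path path row → Pre_move_path path row → Spec_move_path path row (move_path path row)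

-- ===== LEMMAS AND PROOFS =====
lemma move_path_eq_altLoop (path : List Int) :
    ∀ r : Nat, r < path.length → move_path path (r : Int) = pvAltLoop path r := by
  intro r
  induction r with
  | zero => intro _; simp [move_path, pvAltLoop]
  | succ r ih =>
    intro hlt
    have h1 : PySem.List.pyGet? path ((r : Int) + 1) = some path[r + 1] := by
      have := PySem.List.pyGet?_ofNat (xs := path) (n := r + 1) hlt
      simpa [Nat.cast_add] using this
    have h0 : PySem.List.pyGet? path (r : Int) = some path[r] := by
      exact PySem.List.pyGet?_ofNat (xs := path) (n := r) (by omega)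
    have hcast : ((r + 1 : Nat) : Int) = (r : Int) + 1 := by push_cast; ring
    rw [hcast, move_path]
    have hne : ¬ ((r : Int) + 1 = 0) := by omega
    simp only [if_neg hne]
    rw [show (r : Int) + 1 - 1 = (r : Int) by ring]
    rw [h1, h0]
    by_cases hab : path[r + 1] = path[r]
    · simp [pvAltLoop, h1, h0, hab]
    · simp only [if_neg hab]
      rw [ih (by omega)]
      simp [pvAltLoop, h1, h0, hab]

-- ===== VERDICT (by name: the statement is the Claim_ definition above) =====
theorem move_path_spec : Claim_equal_move_path := by
  intro path row _ hpre
  unfold Spec_move_path move_path_alt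
  rcases hpre with h0 | ⟨hpos, hlt⟩
  · subst h0; simp [move_path, pvAltLoop]
  · have hrow : row = ((row.toNat : Nat) : Int) := by omega
    rw [hrow, move_path_eq_altLoop path row.toNat (by omega)]; congr 1
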